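-- pv_equiv track=rewrite | github.com/pypi-data/pypi-mirror-98 | packages/cm-cluster-on-demand-config/cm-cluster-on-demand-config-9.1.3.2.tar.gz/cm-cluster-on-demand-config-9.1.3.2/clusterondemandconfig/print_help.py | _sort_help_sections
-- ===== SOURCE A (Python) =====
-- DEFAULT_HELP_SECTION = "other optional parameters"
--
-- def _sort_help_sections(help_sections, help_section_order):
--     order_specified, other = [], []
--
--     for help_section in help_sections:
--         if help_section in help_section_order:
--             order_specified.append(help_section)
--         elif DEFAULT_HELP_SECTION != help_section:
--             other.append(help_section)
--
--     sorted_help_sections = sorted(order_specified, key=lambda hs: help_section_order.index(hs)) + sorted(other)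
--     if DEFAULT_HELP_SECTION in help_sections:
--         sorted_help_sections.append(DEFAULT_HELP_SECTION)
--     return sorted_help_sections
-- ===== SOURCE B (Python) =====
-- DEFAULT_HELP_SECTION = "other optional parameters"
--
-- def _sort_help_sections(help_sections, help_section_order):
--     n = len(help_section_order)
--
--     def key(hs):
--         if hs in help_section_order:
--             return (help_section_order.index(hs), "")
--         return (n, hs)
--
--     result = sorted(
--         (hs for hs in help_sections
--          if hs in help_section_order or hs != DEFAULT_HELP_SECTION),
--         key=key)
--     if DEFAULT_HELP_SECTION in help_sections:
--         result.append(DEFAULT_HELP_SECTION)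
--     return result
-- ===== Notes on version B (the rewrite author's own statement) =====
-- stated objective: simpler
-- what changed: Replaced A's two-accumulator partition loop plus two separate sorts plus concatenation by a single sorted() pass over a filtered sequence using a composite (order-index, "") / (n, name) tuple key, with the one DEFAULT append kept.
import Mathlib
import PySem

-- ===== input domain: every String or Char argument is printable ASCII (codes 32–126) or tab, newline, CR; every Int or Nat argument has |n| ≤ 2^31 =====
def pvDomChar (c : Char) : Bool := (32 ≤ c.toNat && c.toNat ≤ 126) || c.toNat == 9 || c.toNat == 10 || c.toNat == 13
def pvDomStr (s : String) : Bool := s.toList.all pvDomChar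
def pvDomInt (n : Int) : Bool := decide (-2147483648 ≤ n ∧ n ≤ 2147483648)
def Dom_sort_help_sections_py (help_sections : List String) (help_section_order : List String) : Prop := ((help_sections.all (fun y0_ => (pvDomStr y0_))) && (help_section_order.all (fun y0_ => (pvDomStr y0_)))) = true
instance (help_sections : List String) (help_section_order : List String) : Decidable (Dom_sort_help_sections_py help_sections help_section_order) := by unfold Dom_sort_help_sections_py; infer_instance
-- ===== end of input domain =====

-- B replaces A's two-list partition + two separate sorts + concatenation by one sorted() pass over a
-- filtered sequence with a composite (index, "")/(n, name) key; objective: simpler (one sort, no partition).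

def DEFAULT_HELP_SECTION : String := "other optional parameters"

-- ===== PORT A =====
def sort_help_sections_py (help_sections : List String) (help_section_order : List String) : List String :=
  let acc := help_sections.foldl
    (fun (acc : List String × List String) help_section =>
      if help_section_order.contains help_section then (acc.1 ++ [help_section], acc.2)
      else if DEFAULT_HELP_SECTION ≠ help_section then (acc.1, acc.2 ++ [help_section])
      else acc) ([], [])
  -- `help_section_order.index(hs)`: every element of acc.1 is in help_section_order, so Python's
  -- `.index` never raises and `.getD 0` is never the default there (exact).
  let sorted_help_sections :=
    PySem.List.sorted acc.1 (fun hs => (((PySem.List.index? help_section_order hs).getD 0 : Nat) : Int))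
      ++ PySem.List.sorted acc.2 (fun hs => hs)
  if help_sections.contains DEFAULT_HELP_SECTION then sorted_help_sections ++ [DEFAULT_HELP_SECTION]
  else sorted_help_sections

-- ===== PORT B =====
-- B's Python tuple key `(index, "")` / `(n, hs)`: tuples compare lexicographically, so the key type is Int ×ₗ String.
def pyTupleKey (help_section_order : List String) (n : Int) (hs : String) : Int ×ₗ String :=
  if help_section_order.contains hs then
    toLex ((((PySem.List.index? help_section_order hs).getD 0 : Nat) : Int), "")
  else toLex (n, hs)

def sort_help_sections_py_alt (help_sections : List String) (help_section_order : List String) : List String :=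
  let n : Int := help_section_order.length
  let result := PySem.List.sorted
    (help_sections.filter (fun hs => help_section_order.contains hs || hs != DEFAULT_HELP_SECTION))
    (pyTupleKey help_section_order n)
  if help_sections.contains DEFAULT_HELP_SECTION then result ++ [DEFAULT_HELP_SECTION] else result

-- ===== PRECONDITION & SPEC =====
def Spec_sort_help_sections_py (help_sections : List String) (help_section_order : List String) (out : List String) : Prop := out = sort_help_sections_py_alt help_sections help_section_order
instance (help_sections : List String) (help_section_order : List String) (out : List String) : Decidable (Spec_sort_help_sections_py help_sections help_section_order out) := by unfold Spec_sort_help_sections_py; infer_instance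

-- ===== CLAIM (what is proved, stated in full; the proofs are below) =====
def Claim_equal_sort_help_sections_py : Prop := ∀ (help_sections : List String) (help_section_order : List String), Dom_sort_help_sections_py help_sections help_section_order → Spec_sort_help_sections_py help_sections help_section_order (sort_help_sections_py help_sections help_section_order)

-- ===== LEMMAS AND PROOFS =====

-- A's partition loop builds exactly the two filters of help_sections.
lemma pairFold (l order : List String) (a b : List String) :
    l.foldl
      (fun (acc : List String × List String) help_section =>
        if order.contains help_section then (acc.1 ++ [help_section], acc.2)
        else if DEFAULT_HELP_SECTION ≠ help_section then (acc.1, acc.2 ++ [help_section])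
        else acc) (a, b) =
    (a ++ l.filter (fun h => order.contains h),
     b ++ l.filter (fun h => !order.contains h && !(h == DEFAULT_HELP_SECTION))) := by
  induction l generalizing a b with
  | nil => simp
  | cons x t ih =>
    simp only [List.foldl_cons]
    by_cases hc : order.contains x = true
    · rw [if_pos hc, ih]
      have hm : x ∈ order := List.contains_iff_mem.mp hc
      simp [hm]
    · rw [if_neg hc]
      have hc' : order.contains x = false := by simpa using hc
      by_cases hd : DEFAULT_HELP_SECTION ≠ x
      · rw [if_pos hd, ih]
        have hb : (x == DEFAULT_HELP_SECTION) = false := by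
          simp only [beq_eq_false_iff_ne]
          exact fun h => hd h.symm
        have hm' : x ∉ order := by simpa using hc'
        simp [hb, hm']
      · rw [if_neg hd, ih]
        have hx : x = DEFAULT_HELP_SECTION := (not_not.mp hd).symm
        subst hx
        have hm' : DEFAULT_HELP_SECTION ∉ order := by simpa using hc'
        simp [hm']

lemma filter_or_perm {α : Type} (l : List α) (p q : α → Bool) (h : ∀ x, p x = true → q x = false) :
    (l.filter p ++ l.filter q).Perm (l.filter (fun x => p x || q x)) := by
  induction l with
  | nil => simp
  | cons x t ih =>
    simp only [List.filter_cons]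
    by_cases hp : p x = true
    · have hq : q x = false := h x hp
      simp only [hp, hq, Bool.true_or]
      exact ih.cons x
    · have hp' : p x = false := by simpa using hp
      by_cases hq : q x = true
      · simp only [hp', hq, Bool.false_or]
        exact (List.perm_middle).trans (ih.cons x)
      · have hq' : q x = false := by simpa using hq
        simp only [hp', hq', Bool.false_or]
        exact ih

-- index? facts for members of the order list
lemma idx_spec (order : List String) (hs : String) (h : order.contains hs = true) :
    ∃ i, PySem.List.index? order hs = some i ∧ ∃ (hi : i < order.length), order[i] = hs := by
  have hmem : hs ∈ order := List.contains_iff_mem.mp h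
  have hsome : (order.idxOf? hs).isSome := List.isSome_idxOf?.mpr hmem
  obtain ⟨i, hi⟩ := Option.isSome_iff_exists.mp hsome
  refine ⟨i, hi, ?_⟩
  rw [List.idxOf?_eq_some_iff] at hi
  exact ⟨hi.1, hi.2.1⟩

lemma key_injective (order : List String) :
    Function.Injective (pyTupleKey order (order.length : Int)) := by
  intro x y hxy
  unfold pyTupleKey at hxy
  by_cases hx : order.contains x = true <;> by_cases hy : order.contains y = true
  · rw [if_pos hx, if_pos hy] at hxy
    obtain ⟨i, hi, hilen, hxi⟩ := idx_spec order x hx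
    obtain ⟨j, hj, hjlen, hyj⟩ := idx_spec order y hy
    simp only [toLex_inj, Prod.mk.injEq, hi, hj, Option.getD_some, Nat.cast_inj] at hxy
    have hij : i = j := hxy.1
    subst hij
    exact hxi.symm.trans hyj
  · rw [if_pos hx, if_neg hy] at hxy
    obtain ⟨i, hi, hilen, hxi⟩ := idx_spec order x hx
    simp only [toLex_inj, Prod.mk.injEq, hi, Option.getD_some] at hxy
    have := hxy.1
    omega
  · rw [if_neg hx, if_pos hy] at hxy
    obtain ⟨j, hj, hjlen, hyj⟩ := idx_spec order y hy
    simp only [toLex_inj, Prod.mk.injEq, hj, Option.getD_some] at hxy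
    have := hxy.1
    omega
  · rw [if_neg hx, if_neg hy] at hxy
    simp only [toLex_inj, Prod.mk.injEq] at hxy
    exact hxy.2

-- the heads agree: one lexicographic sort = sort-by-index ++ alphabetical sort
lemma head_eq (l order : List String) :
    PySem.List.sorted
      (l.filter (fun hs => order.contains hs || hs != DEFAULT_HELP_SECTION))
      (pyTupleKey order (order.length : Int)) =
    PySem.List.sorted (l.filter (fun h => order.contains h))
        (fun hs => (((PySem.List.index? order hs).getD 0 : Nat) : Int))
      ++ PySem.List.sorted (l.filter (fun h => !order.contains h && !(h == DEFAULT_HELP_SECTION)))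
        (fun hs => hs) := by
  have hfeq : ∀ x ∈ l,
      (order.contains x || x != DEFAULT_HELP_SECTION) =
      ((fun h => order.contains h) x || (fun h => !order.contains h && !(h == DEFAULT_HELP_SECTION)) x) := by
    intro x _
    by_cases hc : order.contains x = true
    · have hm : x ∈ order := List.contains_iff_mem.mp hc
      rw [hc]; simp [hm]
    · have hc' : order.contains x = false := by simpa using hc
      have hm' : x ∉ order := by simpa using hc'
      rw [hc']; simp [bne, hm']
  rw [List.filter_congr hfeq]
  apply PySem.List.eq_of_perm_of_pairwise_le_of_injective
      (pyTupleKey order (order.length : Int)) (key_injective order)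
  · -- permutation
    refine (PySem.List.sorted_perm _ _ _).trans ?_
    refine ((filter_or_perm l _ _ ?_).symm).trans ?_
    · intro x hx
      have hmem : x ∈ order := by simpa using hx
      simp [hmem]
    · exact ((PySem.List.sorted_perm _ _ false).symm).append ((PySem.List.sorted_perm _ _ false).symm)
  · exact PySem.List.sorted_pairwise _ _
  · -- the concatenation is key-sorted too
    rw [List.pairwise_append]
    refine ⟨?_, ?_, ?_⟩
    · refine (PySem.List.sorted_pairwise _ _).imp_of_mem ?_
      intro a b ha hb hle
      rw [PySem.List.mem_sorted] at ha hb
      have pa := (List.mem_filter.mp ha).2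
      have pb := (List.mem_filter.mp hb).2
      obtain ⟨i, hi, hilen, _⟩ := idx_spec order a pa
      obtain ⟨j, hj, hjlen, _⟩ := idx_spec order b pb
      unfold pyTupleKey
      rw [if_pos pa, if_pos pb, Prod.Lex.toLex_le_toLex]
      simp only [hi, hj, Option.getD_some] at hle ⊢
      rcases eq_or_lt_of_le hle with h | h
      · exact Or.inr ⟨h, le_refl _⟩
      · exact Or.inl h
    · refine (PySem.List.sorted_pairwise _ _).imp_of_mem ?_
      intro a b ha hb hle
      rw [PySem.List.mem_sorted] at ha hb
      have qa := (List.mem_filter.mp ha).2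
      have qb := (List.mem_filter.mp hb).2
      have ca : ¬ (order.contains a = true) := by
        intro hcon
        rcases Bool.and_eq_true_iff.mp qa with ⟨h1, _⟩
        rw [hcon] at h1
        simp at h1
      have cb : ¬ (order.contains b = true) := by
        intro hcon
        rcases Bool.and_eq_true_iff.mp qb with ⟨h1, _⟩
        rw [hcon] at h1
        simp at h1
      unfold pyTupleKey
      rw [if_neg ca, if_neg cb, Prod.Lex.toLex_le_toLex]
      exact Or.inr ⟨rfl, hle⟩
    · intro a ha b hb
      rw [PySem.List.mem_sorted] at ha hb
      have pa := (List.mem_filter.mp ha).2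
      have qb := (List.mem_filter.mp hb).2
      have cb : ¬ (order.contains b = true) := by
        intro hcon
        rcases Bool.and_eq_true_iff.mp qb with ⟨h1, _⟩
        rw [hcon] at h1
        simp at h1
      obtain ⟨i, hi, hilen, _⟩ := idx_spec order a pa
      unfold pyTupleKey
      rw [if_pos pa, if_neg cb, Prod.Lex.toLex_le_toLex]
      refine Or.inl ?_
      simp only [hi, Option.getD_some]
      exact_mod_cast hilen

-- ===== VERDICT (by name: the statement is the Claim_ definition above) =====
theorem sort_help_sections_py_spec : Claim_equal_sort_help_sections_py := by
  intro help_sections help_section_order _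
  unfold Spec_sort_help_sections_py sort_help_sections_py sort_help_sections_py_alt
  simp only [pairFold help_sections help_section_order [] [], List.nil_append]
  rw [head_eq help_sections help_section_order]
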